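-- pv_equiv track=rewrite | github.com/sonic-net/sonic-stp | scripts/lib/python/dn_base_ip_tool.py | _group_lines_based_on_position
-- ===== SOURCE A (Python) =====
-- def find_first_non_ws(str):
--     _str = str.lstrip()
--     return len(str) - len(_str)
--
-- def _group_lines_based_on_position(scope, lines):
--     data = []
--     resp = []
--     for line in lines:
--         if find_first_non_ws(line) == scope:
--             if len(data) > 0:
--                 resp.append(data)
--             data = []
--
--         data.append(line)
--
--     if len(data) > 0:
--         resp.append(data)
--     return resp
-- ===== SOURCE B (Python) =====
-- def find_first_non_ws(str):
--     _str = str.lstrip()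
--     return len(str) - len(_str)
--
-- def _group_lines_based_on_position(scope, lines):
--     # two-pointer slicing: each block runs from a start index to the next scope line
--     resp = []
--     i = 0
--     n = len(lines)
--     while i < n:
--         j = i + 1
--         while j < n and find_first_non_ws(lines[j]) != scope:
--             j += 1
--         resp.append(lines[i:j])
--         i = j
--     return resp
-- ===== Notes on version B (the rewrite author's own statement) =====
-- stated objective: alternative
-- what changed: Replaces A's stateful accumulate-and-flush loop (current-block list plus conditional flush into resp) with a two-pointer index scan that finds each block's end and appends the slice lines[i:j] directly.
import Mathlib
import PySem

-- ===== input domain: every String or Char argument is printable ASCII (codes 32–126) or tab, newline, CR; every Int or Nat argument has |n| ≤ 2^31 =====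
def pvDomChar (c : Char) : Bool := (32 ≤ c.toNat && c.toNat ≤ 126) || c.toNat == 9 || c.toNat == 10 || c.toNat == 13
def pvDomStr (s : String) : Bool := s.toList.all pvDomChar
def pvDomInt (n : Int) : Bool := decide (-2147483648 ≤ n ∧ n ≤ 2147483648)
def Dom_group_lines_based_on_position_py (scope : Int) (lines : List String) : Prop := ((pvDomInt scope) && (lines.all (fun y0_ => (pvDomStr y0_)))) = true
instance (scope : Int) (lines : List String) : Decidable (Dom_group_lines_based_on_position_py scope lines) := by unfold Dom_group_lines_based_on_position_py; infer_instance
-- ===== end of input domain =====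

-- B replaces A's stateful accumulate-and-flush loop by a two-pointer slice scan (alternative decomposition, same cost).


-- ===== PORT A =====
def find_first_non_ws (s : String) : Int :=
  PySem.Str.len s - PySem.Str.len (PySem.Str.lstrip s)

def stepA (scope : Int) (st : List String × List (List String)) (line : String) :
    List String × List (List String) :=
  let st :=
    if find_first_non_ws line = scope then
      (([] : List String), if st.1.length > 0 then st.2 ++ [st.1] else st.2)
    else st
  (st.1 ++ [line], st.2)

def finishA (st : List String × List (List String)) : List (List String) :=
  if st.1.length > 0 then st.2 ++ [st.1] else st.2

def group_lines_based_on_position_py (scope : Int) (lines : List String) : List (List String) :=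
  finishA (lines.foldl (stepA scope) ([], []))

-- ===== PORT B =====
-- the inner 'while j' scan of Source B becomes takeWhile/dropWhile on the suffix; lines[i:j] is the block
def group_lines_based_on_position_py_alt (scope : Int) (lines : List String) : List (List String) :=
  match lines with
  | [] => []
  | x :: xs =>
      (x :: xs.takeWhile (fun l => !decide (find_first_non_ws l = scope))) ::
      group_lines_based_on_position_py_alt scope
        (xs.dropWhile (fun l => !decide (find_first_non_ws l = scope)))
termination_by lines.length
decreasing_by
  simp only [List.length_cons]
  exact Nat.lt_succ_of_le (List.length_dropWhile_le _ _)

-- ===== PRECONDITION & SPEC =====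
def Spec_group_lines_based_on_position_py (scope : Int) (lines : List String) (out : List (List String)) : Prop := out = group_lines_based_on_position_py_alt scope lines
instance (scope : Int) (lines : List String) (out : List (List String)) : Decidable (Spec_group_lines_based_on_position_py scope lines out) := by unfold Spec_group_lines_based_on_position_py; infer_instance

-- ===== CLAIM (what is proved, stated in full; the proofs are below) =====
def Claim_equal_group_lines_based_on_position_py : Prop := ∀ (scope : Int) (lines : List String), Dom_group_lines_based_on_position_py scope lines → Spec_group_lines_based_on_position_py scope lines (group_lines_based_on_position_py scope lines)

-- ===== LEMMAS AND PROOFS =====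
-- invariant of A's loop: with a nonempty current block d, the flushed result is
-- r, then d extended by the scope-free prefix, then B's grouping of the rest
lemma loopA_eq (scope : Int) (xs : List String) (d : List String) (r : List (List String))
    (hd : d ≠ []) :
    finishA (xs.foldl (stepA scope) (d, r)) =
      r ++ (d ++ xs.takeWhile (fun l => !decide (find_first_non_ws l = scope))) ::
        group_lines_based_on_position_py_alt scope
          (xs.dropWhile (fun l => !decide (find_first_non_ws l = scope))) := by
  induction xs generalizing d r with
  | nil =>
      simp [finishA, group_lines_based_on_position_py_alt,
        List.length_pos_iff.mpr hd]
  | cons y ys ih =>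
      by_cases h : find_first_non_ws y = scope
      · have hstep : stepA scope (d, r) y = ([y], r ++ [d]) := by
          simp [stepA, h, List.length_pos_iff.mpr hd]
        rw [List.foldl_cons, hstep, ih [y] (r ++ [d]) (by simp)]
        simp [h, group_lines_based_on_position_py_alt]
      · have hstep : stepA scope (d, r) y = (d ++ [y], r) := by
          simp [stepA, h]
        rw [List.foldl_cons, hstep, ih (d ++ [y]) r (by simp)]
        simp [h]

-- ===== VERDICT (by name: the statement is the Claim_ definition above) =====
theorem group_lines_based_on_position_py_spec : Claim_equal_group_lines_based_on_position_py := by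
  intro scope lines _
  show group_lines_based_on_position_py scope lines = group_lines_based_on_position_py_alt scope lines
  cases lines with
  | nil => simp [group_lines_based_on_position_py, finishA, group_lines_based_on_position_py_alt]
  | cons x xs =>
      have hstep : stepA scope ([], []) x = ([x], []) := by
        by_cases h : find_first_non_ws x = scope <;> simp [stepA, h]
      rw [group_lines_based_on_position_py, List.foldl_cons, hstep,
        loopA_eq scope xs [x] [] (by simp)]
      simp [group_lines_based_on_position_py_alt]
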